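-- pv_equiv track=rewrite | github.com/Naveen-Krishnamurthy/PythonProgramming | PythonPrograms/workspace/BasicsPython/BasicTestPackage/PatternWithoutRegEx.py | checkPhoneNumber
-- ===== SOURCE A (Python) =====
-- def checkPhoneNumber(phNumber):
--     if len(phNumber)!=12 :
--         return False
--
--     for i in range(0,3) :
--         if not phNumber[i].isdecimal() :
--             return False
--
--     if phNumber[3]!='-' :
--         return False
--
--     for i in range(4,7) :
--         if not phNumber[i].isdecimal() :
--             return False
--
--     if phNumber[7]!='-' :
--         return False
--
--     for i in range(8,12) :
--         if not phNumber[i].isdecimal() :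
--             return False
--     return True
-- ===== SOURCE B (Python) =====
-- def checkPhoneNumber(phNumber):
--     parts = phNumber.split('-')
--     if len(parts) != 3:
--         return False
--     area, mid, last = parts
--     return (len(area) == 3 and len(mid) == 3 and len(last) == 4
--             and area.isdecimal() and mid.isdecimal() and last.isdecimal())
-- ===== Notes on version B (the rewrite author's own statement) =====
-- stated objective: simpler
-- what changed: Replaces A's five positional checks (length test, three index-ranged digit loops, two dash comparisons) with a single split on the dash separator into groups validated by length and isdecimal.
import Mathlib
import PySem

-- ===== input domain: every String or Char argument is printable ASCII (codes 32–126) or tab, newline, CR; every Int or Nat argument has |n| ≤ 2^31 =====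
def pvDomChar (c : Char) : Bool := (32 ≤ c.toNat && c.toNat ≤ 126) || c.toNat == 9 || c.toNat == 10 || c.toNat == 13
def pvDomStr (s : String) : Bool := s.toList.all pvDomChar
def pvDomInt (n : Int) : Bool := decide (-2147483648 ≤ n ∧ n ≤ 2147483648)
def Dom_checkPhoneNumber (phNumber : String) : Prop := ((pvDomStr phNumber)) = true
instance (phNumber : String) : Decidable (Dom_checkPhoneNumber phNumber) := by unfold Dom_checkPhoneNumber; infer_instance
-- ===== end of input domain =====

-- B replaces A's five positional checks with one split('-') validated by group lengths and isdecimal (objective: simpler).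
-- Python's str.isdecimal is ported as PySem.Chars.isdigit: exact on the ASCII domain Dom_checkPhoneNumber, where the two agree.

-- ===== PORT A =====
def checkPhoneNumber (phNumber : String) : Bool :=
  let cs := phNumber.toList
  if PySem.Chars.len cs ≠ 12 then false
  -- the length guard above keeps every index below in range, so pyGetD never hits its default
  else if ¬ ((PySem.List.pyRange 0 3 1).all fun i => PySem.Chars.isdigit (PySem.List.pyGetD cs i ' ')) then false
  else if PySem.List.pyGetD cs 3 ' ' ≠ '-' then false
  else if ¬ ((PySem.List.pyRange 4 7 1).all fun i => PySem.Chars.isdigit (PySem.List.pyGetD cs i ' ')) then false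
  else if PySem.List.pyGetD cs 7 ' ' ≠ '-' then false
  else if ¬ ((PySem.List.pyRange 8 12 1).all fun i => PySem.Chars.isdigit (PySem.List.pyGetD cs i ' ')) then false
  else true

-- ===== PORT B =====
def checkPhoneNumber_alt (phNumber : String) : Bool :=
  match PySem.Chars.splitOn phNumber.toList ['-'] with
  | [area, mid, last] =>
      PySem.Chars.len area == 3 && PySem.Chars.len mid == 3 && PySem.Chars.len last == 4
        && PySem.Chars.strIsdigit area && PySem.Chars.strIsdigit mid && PySem.Chars.strIsdigit last
  | _ => false

-- ===== PRECONDITION & SPEC =====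
def Spec_checkPhoneNumber (phNumber : String) (out : Bool) : Prop := out = checkPhoneNumber_alt phNumber
instance (phNumber : String) (out : Bool) : Decidable (Spec_checkPhoneNumber phNumber out) := by unfold Spec_checkPhoneNumber; infer_instance

-- ===== CLAIM (what is proved, stated in full; the proofs are below) =====
def Claim_equal_checkPhoneNumber : Prop := ∀ (phNumber : String), Dom_checkPhoneNumber phNumber → Spec_checkPhoneNumber phNumber (checkPhoneNumber phNumber)

-- ===== LEMMAS AND PROOFS =====

-- structural recursion equal to PySem.Chars.splitOn · ['-']
def spDash : List Char → List (List Char)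
  | [] => [[]]
  | c :: rest => if c = '-' then [] :: spDash rest else (spDash rest).modifyHead (c :: ·)

lemma spDash_ne_nil (cs : List Char) : spDash cs ≠ [] := by
  cases cs with
  | nil => simp [spDash]
  | cons c rest =>
    simp only [spDash]
    split_ifs
    · simp
    · cases h : spDash rest with
      | nil => exact absurd h (spDash_ne_nil rest)
      | cons p ps => simp

lemma splitOn_go_eq (l : List Char) : ∀ (fuel : Nat) (cur : List Char) (acc : List (List Char)),
    l.length ≤ fuel →
    PySem.Chars.splitOn.go ['-'] fuel l cur acc
      = acc.reverse ++ (spDash l).modifyHead (cur.reverse ++ ·) := by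
  induction l with
  | nil =>
    intro fuel cur acc _
    cases fuel <;> simp [PySem.Chars.splitOn.go, spDash]
  | cons c rest ih =>
    intro fuel cur acc h
    cases fuel with
    | zero => simp at h
    | succ f =>
      rw [PySem.Chars.splitOn.go]
      by_cases hc : c = '-'
      · subst hc
        simp only [List.isPrefixOf, beq_self_eq_true, Bool.true_and,
          if_true, List.length_nil, List.length_cons, List.drop_succ_cons, List.drop_zero,
          zero_add]
        rw [ih f [] (cur.reverse :: acc) (by simpa using Nat.le_of_succ_le_succ h)]
        simp [spDash,
          show List.modifyHead (fun x : List Char => x) (spDash rest) = spDash rest from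
            congrFun List.modifyHead_id _]
      · have hcd : ('-' : Char) ≠ c := fun e => hc e.symm
        have hpre : (['-'].isPrefixOf (c :: rest)) = false := by
          simp [List.isPrefixOf, hcd]
        rw [if_neg (by simp [hpre])]
        rw [ih f (c :: cur) acc (by simpa using Nat.le_of_succ_le_succ h)]
        simp only [spDash, if_neg hc, List.modifyHead_modifyHead]
        congr 1
        congr 1
        funext x
        simp

lemma splitOn_eq_spDash (cs : List Char) : PySem.Chars.splitOn cs ['-'] = spDash cs := by
  rw [PySem.Chars.splitOn, splitOn_go_eq cs (cs.length + 1) [] [] (by omega)]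
  simp only [List.reverse_nil, List.nil_append]
  exact congrFun List.modifyHead_id (spDash cs)

lemma spDash_no_dash {cs : List Char} (h : '-' ∉ cs) : spDash cs = [cs] := by
  induction cs with
  | nil => simp [spDash]
  | cons c rest ih =>
    simp only [List.mem_cons, not_or] at h
    have hc : ¬ c = '-' := fun e => h.1 e.symm
    simp [spDash, hc, ih h.2]

lemma spDash_append_no_dash {a : List Char} (cs : List Char) (h : '-' ∉ a) :
    spDash (a ++ cs) = (spDash cs).modifyHead (a ++ ·) := by
  induction a with
  | nil =>
    simp only [List.nil_append]
    exact (congrFun List.modifyHead_id _).symm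
  | cons c rest ih =>
    simp only [List.mem_cons, not_or] at h
    have hc : ¬ c = '-' := fun e => h.1 e.symm
    simp only [List.cons_append, spDash, if_neg hc, ih h.2, List.modifyHead_modifyHead]
    rfl

lemma spDash_one {cs a : List Char} (h : spDash cs = [a]) : cs = a ∧ '-' ∉ a := by
  induction cs generalizing a with
  | nil =>
    simp only [spDash, List.cons.injEq, and_true] at h
    subst h
    simp
  | cons c rest ih =>
    simp only [spDash] at h
    split_ifs at h with hc
    · exact absurd (by simpa using congrArg List.tail h) (spDash_ne_nil rest)
    · cases hr : spDash rest with
      | nil => exact absurd hr (spDash_ne_nil rest)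
      | cons p ps =>
        rw [hr] at h
        simp only [List.modifyHead_cons] at h
        obtain ⟨h1, h2⟩ := List.cons_eq_cons.mp h
        subst h2
        obtain ⟨he, hd⟩ := ih hr
        subst he h1
        refine ⟨rfl, ?_⟩
        simp only [List.mem_cons, not_or]
        exact ⟨fun e => hc e.symm, hd⟩

lemma spDash_two {cs a b : List Char} (h : spDash cs = [a, b]) :
    cs = a ++ '-' :: b ∧ '-' ∉ a ∧ '-' ∉ b := by
  induction cs generalizing a with
  | nil => simp [spDash] at h
  | cons c rest ih =>
    simp only [spDash] at h
    split_ifs at h with hc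
    · obtain ⟨h1, h2⟩ := List.cons_eq_cons.mp h
      subst hc h1
      obtain ⟨he, hd⟩ := spDash_one h2
      subst he
      simp [hd]
    · cases hr : spDash rest with
      | nil => exact absurd hr (spDash_ne_nil rest)
      | cons p ps =>
        rw [hr] at h
        simp only [List.modifyHead_cons] at h
        obtain ⟨h1, h2⟩ := List.cons_eq_cons.mp h
        subst h2
        obtain ⟨he, hda, hdb⟩ := ih hr
        subst he h1
        refine ⟨by simp, ?_, hdb⟩
        simp only [List.mem_cons, not_or]
        exact ⟨fun e => hc e.symm, hda⟩

lemma spDash_three {cs a b c : List Char} (h : spDash cs = [a, b, c]) :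
    cs = a ++ '-' :: (b ++ '-' :: c) ∧ '-' ∉ a ∧ '-' ∉ b ∧ '-' ∉ c := by
  induction cs generalizing a with
  | nil => simp [spDash] at h
  | cons ch rest ih =>
    simp only [spDash] at h
    split_ifs at h with hc
    · obtain ⟨h1, h2⟩ := List.cons_eq_cons.mp h
      subst hc h1
      obtain ⟨he, hdb, hdc⟩ := spDash_two h2
      subst he
      simp [hdb, hdc]
    · cases hr : spDash rest with
      | nil => exact absurd hr (spDash_ne_nil rest)
      | cons p ps =>
        rw [hr] at h
        simp only [List.modifyHead_cons] at h
        obtain ⟨h1, h2⟩ := List.cons_eq_cons.mp h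
        subst h2
        obtain ⟨he, hda, hdb, hdc⟩ := ih hr
        subst he h1
        refine ⟨by simp, ?_, hdb, hdc⟩
        simp only [List.mem_cons, not_or]
        exact ⟨fun e => hc e.symm, hda⟩

lemma isdigit_ne_dash {c : Char} (h : PySem.Chars.isdigit c = true) : c ≠ '-' := by
  simp only [PySem.Chars.isdigit, Bool.and_eq_true, decide_eq_true_eq] at h
  intro hc
  subst hc
  exact absurd h.1 (by decide)

def PhShape (cs : List Char) : Prop :=
  ∃ a b c : List Char, cs = a ++ '-' :: (b ++ '-' :: c)
    ∧ a.length = 3 ∧ b.length = 3 ∧ c.length = 4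
    ∧ a.all PySem.Chars.isdigit ∧ b.all PySem.Chars.isdigit ∧ c.all PySem.Chars.isdigit

lemma rangeA : PySem.List.pyRange 0 3 1 = [0, 1, 2] := by decide
lemma rangeB : PySem.List.pyRange 4 7 1 = [4, 5, 6] := by decide
lemma rangeC : PySem.List.pyRange 8 12 1 = [8, 9, 10, 11] := by decide

lemma coreA_iff (s : String) : checkPhoneNumber s = true ↔ PhShape s.toList := by
  constructor
  · intro h
    unfold checkPhoneNumber at h
    simp only [rangeA, rangeB, rangeC] at h
    split_ifs at h with h1 h2 h3 h4 h5 h6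
    rw [not_not, PySem.Chars.len_eq] at h1
    have h1' : s.toList.length = 12 := by exact_mod_cast h1
    rw [not_not] at h3 h5
    rcases hs : s.toList with _ | ⟨c0, _ | ⟨c1, _ | ⟨c2, _ | ⟨c3, _ | ⟨c4, _ | ⟨c5, _ | ⟨c6,
      _ | ⟨c7, _ | ⟨c8, _ | ⟨c9, _ | ⟨c10, _ | ⟨c11, _ | ⟨c12, tl⟩⟩⟩⟩⟩⟩⟩⟩⟩⟩⟩⟩⟩ <;>
      rw [hs] at h1' <;> simp only [List.length_nil, List.length_cons] at h1' <;> try omega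
    rw [hs] at h2 h3 h4 h5 h6
    simp only [List.all_cons, List.all_nil, Bool.and_eq_true,
      PySem.List.pyGetD_ofNat', List.getD_cons_succ, List.getD_cons_zero] at h2 h3 h4 h5 h6
    subst h3 h5
    exact ⟨[c0, c1, c2], [c4, c5, c6], [c8, c9, c10, c11], by simp_all⟩
  · rintro ⟨a, b, c, hcs, ha3, hb3, hc4, hda, hdb, hdc⟩
    rcases a with _ | ⟨a0, _ | ⟨a1, _ | ⟨a2, _ | ⟨a3, ta⟩⟩⟩⟩ <;> simp only [List.length_nil,
      List.length_cons] at ha3 <;> try omega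
    rcases b with _ | ⟨b0, _ | ⟨b1, _ | ⟨b2, _ | ⟨b3, tb⟩⟩⟩⟩ <;> simp only [List.length_nil,
      List.length_cons] at hb3 <;> try omega
    rcases c with _ | ⟨c0, _ | ⟨c1, _ | ⟨c2, _ | ⟨c3, _ | ⟨c4, tc⟩⟩⟩⟩⟩ <;> simp only
      [List.length_nil, List.length_cons] at hc4 <;> try omega
    simp only [List.all_cons, List.all_nil, Bool.and_eq_true, and_true] at hda hdb hdc
    unfold checkPhoneNumber
    rw [hcs]
    simp only [rangeA, rangeB, rangeC, List.cons_append, List.nil_append]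
    simp only [PySem.Chars.len_eq, List.length_cons, List.length_nil,
      PySem.List.pyGetD_ofNat', List.getD_cons_succ, List.getD_cons_zero,
      List.all_cons, List.all_nil]
    simp_all

lemma coreB_iff (s : String) : checkPhoneNumber_alt s = true ↔ PhShape s.toList := by
  unfold checkPhoneNumber_alt
  rw [splitOn_eq_spDash]
  constructor
  · intro h
    cases hsp : spDash s.toList with
    | nil => exact absurd hsp (spDash_ne_nil _)
    | cons a ps =>
      rcases ps with _ | ⟨b, _ | ⟨c, _ | ⟨d, ps⟩⟩⟩ <;> rw [hsp] at h
      · exact absurd h (by simp)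
      · exact absurd h (by simp)
      · obtain ⟨hcs, _, _, _⟩ := spDash_three hsp
        simp only [Bool.and_eq_true, beq_iff_eq, PySem.Chars.len_eq,
          PySem.Chars.strIsdigit, Bool.not_eq_true', List.isEmpty_eq_false_iff] at h
        exact ⟨a, b, c, hcs, by exact_mod_cast h.1.1.1.1.1, by exact_mod_cast h.1.1.1.1.2,
          by exact_mod_cast h.1.1.1.2, h.1.1.2.2, h.1.2.2, h.2.2⟩
      · exact absurd h (by simp)
  · rintro ⟨a, b, c, hcs, ha3, hb3, hc4, hda, hdb, hdc⟩
    have hna : '-' ∉ a := fun hm => isdigit_ne_dash (List.all_eq_true.mp hda _ hm) rfl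
    have hnb : '-' ∉ b := fun hm => isdigit_ne_dash (List.all_eq_true.mp hdb _ hm) rfl
    have hnc : '-' ∉ c := fun hm => isdigit_ne_dash (List.all_eq_true.mp hdc _ hm) rfl
    have hsp : spDash s.toList = [a, b, c] := by
      rw [hcs, spDash_append_no_dash _ hna]
      show (spDash ('-' :: (b ++ '-' :: c))).modifyHead _ = _
      simp only [spDash, if_true]
      rw [spDash_append_no_dash _ hnb]
      show ([] :: (spDash ('-' :: c)).modifyHead _).modifyHead _ = _
      simp only [spDash, if_true, spDash_no_dash hnc]
      simp
    rw [hsp]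
    simp only [Bool.and_eq_true, beq_iff_eq, PySem.Chars.len_eq, PySem.Chars.strIsdigit,
      Bool.not_eq_true', List.isEmpty_eq_false_iff]
    refine ⟨⟨⟨⟨⟨by exact_mod_cast ha3, by exact_mod_cast hb3⟩, by exact_mod_cast hc4⟩,
      ?_, hda⟩, ?_, hdb⟩, ?_, hdc⟩ <;> simp [← List.length_pos_iff] <;> omega

-- ===== VERDICT (by name: the statement is the Claim_ definition above) =====
theorem checkPhoneNumber_spec : Claim_equal_checkPhoneNumber := by
  intro s _
  unfold Spec_checkPhoneNumber
  rw [Bool.eq_iff_iff, coreA_iff, coreB_iff]
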